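-- pv_equiv track=rewrite | github.com/dozybot001/maars | backend/monitor/__init__.py | _group_by_stage
-- ===== SOURCE A (Python) =====
-- from typing import Any, Dict, List
--
-- def _group_by_stage(tree_data: List[Dict]) -> List[List[Dict]]:
--     stage_map: Dict[int, List[Dict]] = {}
--     for t in tree_data or []:
--         idx = (t.get("stage") or 1) - 1
--         if idx not in stage_map:
--             stage_map[idx] = []
--         stage_map[idx].append(t)
--     return [stage_map[k] for k in sorted(stage_map.keys())]
-- ===== SOURCE B (Python) =====
-- def _group_by_stage(tree_data):
--     items = list(tree_data or [])
--     key = lambda t: (t.get("stage") or 1) - 1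
--     return [[t for t in items if key(t) == k] for k in sorted({key(t) for t in items})]
-- ===== Notes on version B (the rewrite author's own statement) =====
-- stated objective: simpler
-- what changed: A builds a dict of lists in one pass and then reads it back by sorted key; B computes the sorted distinct stage keys once and emits one order-preserving filter of the input per key, with no mutable mapping.
import Mathlib
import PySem

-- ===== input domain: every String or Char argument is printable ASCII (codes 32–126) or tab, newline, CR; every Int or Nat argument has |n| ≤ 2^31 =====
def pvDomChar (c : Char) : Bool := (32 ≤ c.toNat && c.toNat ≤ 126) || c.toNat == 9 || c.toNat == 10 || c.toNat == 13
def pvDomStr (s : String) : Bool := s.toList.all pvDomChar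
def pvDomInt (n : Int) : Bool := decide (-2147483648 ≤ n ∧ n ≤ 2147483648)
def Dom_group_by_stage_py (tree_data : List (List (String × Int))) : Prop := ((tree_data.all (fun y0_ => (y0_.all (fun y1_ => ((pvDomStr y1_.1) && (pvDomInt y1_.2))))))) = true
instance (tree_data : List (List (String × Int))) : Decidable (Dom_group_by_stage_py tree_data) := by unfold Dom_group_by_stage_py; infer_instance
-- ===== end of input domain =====

-- B replaces A's incremental dict-of-lists with "sorted distinct stage keys, then one filter per key";
-- objective: simpler (no speed claim). Same return value on every input; neither version mutates its argument.

-- ===== PORT A =====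
-- shared key expression of both Pythons: (t.get("stage") or 1) - 1  (0 and a missing key are falsy)
def pvStageKey (t : List (String × Int)) : Int :=
  (match (PySem.Dict.mk t).get? "stage" with
   | some v => if v = 0 then 1 else v
   | none => 1) - 1

def group_by_stage_py (tree_data : List (List (String × Int))) : List (List (List (String × Int))) :=
  -- 'tree_data or []' is the identity on a list argument
  let sm : PySem.Dict Int (List (List (String × Int))) :=
    tree_data.foldl (fun sm t =>
      let idx := pvStageKey t
      let sm := if sm.contains idx then sm else sm.insert idx []   -- if idx not in stage_map: stage_map[idx] = []
      sm.modify idx [] (fun l => l ++ [t]))                        -- stage_map[idx].append(t)  (key present; default unused)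
      PySem.Dict.empty
  (PySem.List.sorted (PySem.Dict.keys sm) (fun k => k) false).map (fun k => sm.getD k [])  -- stage_map[k]: k always a key

-- ===== PORT B =====
def group_by_stage_py_alt (tree_data : List (List (String × Int))) : List (List (List (String × Int))) :=
  (PySem.List.sorted (PySem.Set.ofList (tree_data.map pvStageKey)) (fun k => k) false).map
    (fun k => tree_data.filter (fun t => pvStageKey t == k))

-- ===== PRECONDITION & SPEC =====
def Spec_group_by_stage_py (tree_data : List (List (String × Int))) (out : List (List (List (String × Int)))) : Prop := out = group_by_stage_py_alt tree_data
instance (tree_data : List (List (String × Int))) (out : List (List (List (String × Int)))) : Decidable (Spec_group_by_stage_py tree_data out) := by unfold Spec_group_by_stage_py; infer_instance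

-- ===== CLAIM (what is proved, stated in full; the proofs are below) =====
def Claim_equal_group_by_stage_py : Prop := ∀ (tree_data : List (List (String × Int))), Dom_group_by_stage_py tree_data → Spec_group_by_stage_py tree_data (group_by_stage_py tree_data)

-- ===== LEMMAS AND PROOFS =====

-- A's "ensure the key exists, then append" step is one Dict.modify
lemma pv_step_eq (d : PySem.Dict Int (List (List (String × Int)))) (k : Int)
    (f : List (List (String × Int)) → List (List (String × Int))) :
    ((if d.contains k then d else d.insert k []).modify k [] f) = d.modify k [] f := by
  by_cases h : d.contains k = true
  · simp [h]
  · have h' : d.contains k = false := by simpa using h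
    rw [if_neg (by simp [h'])]
    simp only [PySem.Dict.modify, PySem.Dict.getD_insert_self,
      PySem.Dict.getD_of_not_contains _ _ h']
    apply PySem.Dict.ext
    rw [PySem.Dict.items_insert_of_contains _ _ (by simp),
        PySem.Dict.items_insert_of_not_contains _ _ h',
        PySem.Dict.items_insert_of_not_contains _ _ h']
    simp only [List.map_append]
    have hnf : ∀ p ∈ d.items, (p.1 == k) = false := by
      intro p hp
      have := h'; simp [PySem.Dict.contains, List.any_eq_false] at this
      simpa using this p.1 p.2 hp
    congr 1
    · conv_rhs => rw [← List.map_id d.items]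
      exact List.map_congr_left (fun p hp => by simp [hnf p hp])
    · simp

lemma pv_sm_eq (tree : List (List (String × Int))) :
    tree.foldl (fun sm t =>
      let idx := pvStageKey t
      let sm := if sm.contains idx then sm else sm.insert idx []
      sm.modify idx [] (fun l => l ++ [t])) PySem.Dict.empty
    = tree.foldl (fun d t => d.modify (pvStageKey t) [] (fun l => l ++ [t])) PySem.Dict.empty := by
  congr 1; funext d t; exact pv_step_eq d (pvStageKey t) _

-- the group stored under key c is exactly the order-preserving filter of the input
lemma pv_getD_sm (tree : List (List (String × Int))) (c : Int) :
    (tree.foldl (fun d t => d.modify (pvStageKey t) [] (fun l => l ++ [t])) PySem.Dict.empty).getD c []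
    = tree.filter (fun t => pvStageKey t == c) := by
  have h := PySem.Dict.getD_foldl_modify_append (l := tree.map (fun t => (pvStageKey t, t)))
      (d := (PySem.Dict.empty : PySem.Dict Int (List (List (String × Int))))) (c := c)
  rw [List.foldl_map] at h
  simp only [PySem.Dict.getD_empty] at h
  rw [h, List.filter_map, List.map_map]
  simp [Function.comp_def]

-- A's dict keys are the distinct stage keys, as B's set comprehension builds them
lemma pv_keys_sm (tree : List (List (String × Int))) :
    (tree.foldl (fun d t => d.modify (pvStageKey t) [] (fun l => l ++ [t])) PySem.Dict.empty).keys
    = PySem.Set.ofList (tree.map pvStageKey) := by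
  rw [PySem.Dict.keys_foldl_modify_key]
  simp [PySem.Dict.keys_empty, PySem.Set.update, PySem.Set.ofList_eq_foldl]

-- ===== VERDICT (by name: the statement is the Claim_ definition above) =====
theorem group_by_stage_py_spec : Claim_equal_group_by_stage_py := by
  intro tree _
  unfold Spec_group_by_stage_py group_by_stage_py group_by_stage_py_alt
  simp only [pv_sm_eq, pv_keys_sm]
  exact List.map_congr_left (fun k _ => pv_getD_sm tree k)
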